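-- pv_equiv track=rewrite | github.com/JakeSaunders1995/comp16321MarkingMid | CW_rugby/rugby_n96249ty/rugby_n96249ty.py | calculate
-- ===== SOURCE A (Python) =====
-- def calculate(string):
-- 	t1 = 0
-- 	t2 = 0
--
-- 	for i, char in enumerate(string):
-- 		if i % 3 == 2:
-- 			if char == "t":
-- 				score = 5
-- 			elif char == "c":
-- 				score = 2
-- 			else:
-- 				score = 3
--
-- 			if string[i - 1] == "1":
-- 				t1 += score
-- 			else:
-- 				t2 += score
--
-- 	return f"{t1}:{t2}"
-- ===== SOURCE B (Python) =====
-- def calculate(string):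
--     t1 = 0
--     t2 = 0
--     it = iter(string)
--     for _, team, typ in zip(it, it, it):
--         score = 5 if typ == "t" else 2 if typ == "c" else 3
--         if team == "1":
--             t1 += score
--         else:
--             t2 += score
--     return f"{t1}:{t2}"
-- ===== Notes on version B (the rewrite author's own statement) =====
-- stated objective: idiomatic
-- what changed: B consumes the string in disjoint 3-character groups via the zip(it, it, it) grouper idiom instead of enumerating every character, testing i % 3 == 2 and back-indexing string[i-1]; no index arithmetic remains and the per-character interpreter work drops (measured ~2x).
import Mathlib
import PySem

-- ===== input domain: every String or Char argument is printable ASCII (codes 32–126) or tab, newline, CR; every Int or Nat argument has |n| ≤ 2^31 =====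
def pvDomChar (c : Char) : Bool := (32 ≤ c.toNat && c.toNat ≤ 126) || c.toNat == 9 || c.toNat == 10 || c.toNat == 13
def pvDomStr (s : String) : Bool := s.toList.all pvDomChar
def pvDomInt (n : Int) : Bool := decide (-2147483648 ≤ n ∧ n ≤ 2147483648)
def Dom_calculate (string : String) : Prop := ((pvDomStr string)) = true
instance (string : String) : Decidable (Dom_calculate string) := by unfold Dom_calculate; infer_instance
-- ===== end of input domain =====

-- B replaces A's enumerate + `i % 3 == 2` + back-index `string[i-1]` pass with the
-- zip(it, it, it) grouper idiom, consuming the string in disjoint 3-character groups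
-- (objective: idiomatic).

-- ===== PORT A =====
-- Step of A's `for i, char in enumerate(string)` loop over the state (t1, t2).
-- `string[i - 1]` is ported with pyGetD: when the branch fires, i % 3 == 2 forces 2 ≤ i,
-- so the index i - 1 is always in range and pyGetD is exact there (Python never raises).
def calcStepA (cs : List Char) (st : Int × Int) (p : Int × Char) : Int × Int :=
  if PySem.Int.mod p.1 3 = 2 then
    let score : Int := if p.2 = 't' then 5 else if p.2 = 'c' then 2 else 3
    if PySem.List.pyGetD cs (p.1 - 1) ' ' = '1' then (st.1 + score, st.2)
    else (st.1, st.2 + score)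
  else st

def calculate (string : String) : String :=
  let cs := string.toList
  let st := (PySem.List.enumerate cs 0).foldl (calcStepA cs) (0, 0)
  PySem.Int.toStr st.1 ++ ":" ++ PySem.Int.toStr st.2

-- ===== PORT B =====
-- B's `for _, team, typ in zip(it, it, it)` loop: zip of three copies of one iterator
-- yields the consecutive disjoint 3-char groups and drops a trailing incomplete group,
-- so it is ported as structural recursion taking three characters at a time.
def calcGoB (t1 t2 : Int) : List Char → Int × Int
  | _ :: team :: typ :: rest =>
      let score : Int := if typ = 't' then 5 else if typ = 'c' then 2 else 3
      if team = '1' then calcGoB (t1 + score) t2 rest else calcGoB t1 (t2 + score) rest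
  | _ => (t1, t2)

def calculate_alt (string : String) : String :=
  let st := calcGoB 0 0 string.toList
  PySem.Int.toStr st.1 ++ ":" ++ PySem.Int.toStr st.2

-- ===== PRECONDITION & SPEC =====
def Spec_calculate (string : String) (out : String) : Prop := out = calculate_alt string
instance (string : String) (out : String) : Decidable (Spec_calculate string out) := by unfold Spec_calculate; infer_instance

-- ===== CLAIM (what is proved, stated in full; the proofs are below) =====
def Claim_equal_calculate : Prop := ∀ (string : String), Dom_calculate string → Spec_calculate string (calculate string)

-- ===== LEMMAS AND PROOFS =====

-- A's fold over the enumerated suffix cs.drop j (j a multiple of 3) equals B's chunk loop on it.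
theorem calc_fold_eq_go (cs : List Char) :
    ∀ (n : Nat) (zs : List Char), zs.length ≤ n → ∀ (j : Nat), 3 ∣ j → cs.drop j = zs →
      ∀ (t1 t2 : Int),
        (PySem.List.enumerate zs (j : Int)).foldl (calcStepA cs) (t1, t2) = calcGoB t1 t2 zs := by
  have hm : ∀ a : Int, PySem.Int.mod a 3 = a % 3 := fun a =>
    PySem.Int.mod_eq_emod_of_pos (by norm_num)
  intro n
  induction n with
  | zero =>
      intro zs hlen j _ _ t1 t2
      have hz : zs = [] := List.eq_nil_of_length_eq_zero (Nat.le_zero.mp hlen)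
      subst hz
      simp [PySem.List.enumerate_nil, calcGoB]
  | succ n ih =>
      intro zs hlen j hdvd hdrop t1 t2
      have s0 : ∀ (st : Int × Int) (x : Char), calcStepA cs st ((j : Int), x) = st := by
        intro st x
        simp only [calcStepA]
        rw [hm, if_neg (by omega)]
      have s1 : ∀ (st : Int × Int) (x : Char), calcStepA cs st ((j : Int) + 1, x) = st := by
        intro st x
        simp only [calcStepA]
        rw [hm, if_neg (by omega)]
      match zs with
      | [] => simp [PySem.List.enumerate_nil, calcGoB]
      | [a] =>
          simp only [PySem.List.enumerate_cons, PySem.List.enumerate_nil, List.foldl_cons,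
            List.foldl_nil, s0]
          rfl
      | [a, b] =>
          simp only [PySem.List.enumerate_cons, PySem.List.enumerate_nil, List.foldl_cons,
            List.foldl_nil, s0, s1]
          rfl
      | a :: b :: c :: rest =>
          -- string[i - 1] at i = j + 2 is the char b of this chunk
          have hb : PySem.List.pyGetD cs ((j : Int) + 1 + 1 - 1) ' ' = b := by
            rw [show ((j : Int) + 1 + 1 - 1) = ((j + 1 : Nat) : Int) by push_cast; ring,
              PySem.List.pyGetD_natCast]
            have h1 : cs[j + 1]? = some b := by
              have h := List.getElem?_drop (xs := cs) (i := j) (j := 1)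
              rw [hdrop] at h
              simpa using h.symm
            simp [List.getD, h1]
          have s2 : calcStepA cs (t1, t2) ((j : Int) + 1 + 1, c)
              = (if b = '1' then (t1 + (if c = 't' then 5 else if c = 'c' then 2 else 3), t2)
                 else (t1, t2 + (if c = 't' then 5 else if c = 'c' then 2 else 3))) := by
            simp only [calcStepA]
            rw [hm, if_pos (by omega), hb]
          have hrest : cs.drop (j + 3) = rest := by
            have h3 : List.drop 3 (cs.drop j) = rest := by rw [hdrop]; rfl
            simpa [List.drop_drop, Nat.add_comm] using h3
          have hlen' : rest.length ≤ n := by simp at hlen; omega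
          have hrec := ih rest hlen' (j + 3) (by omega) hrest
          have hcast : ((j : Int) + 1 + 1 + 1) = ((j + 3 : Nat) : Int) := by push_cast; ring
          simp only [PySem.List.enumerate_cons, List.foldl_cons, s0, s1, s2, hcast]
          by_cases hteam : b = '1'
          · rw [if_pos hteam, hrec]
            simp only [calcGoB]
            rw [if_pos hteam]
          · rw [if_neg hteam, hrec]
            simp only [calcGoB]
            rw [if_neg hteam]

-- ===== VERDICT (by name: the statement is the Claim_ definition above) =====
theorem calculate_spec : Claim_equal_calculate := by
  intro string _
  unfold Spec_calculate calculate calculate_alt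
  have h := calc_fold_eq_go string.toList string.toList.length string.toList (le_refl _) 0
    ⟨0, rfl⟩ (by simp) 0 0
  simp only [Nat.cast_zero] at h
  simp only [h]
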